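-- pv_equiv track=rewrite | github.com/MichaelRFox/conferenceMetrics | tools/python/metrics.py | __absWindow
-- ===== SOURCE A (Python) =====
-- def __absWindow(data, k):
--     d = {}
--     years = sorted(data.keys())
--     for year in years[k:]:
--         previous = set()
--         for y in [y for y in years[years.index(year)-k: years.index(year)]]:
--             previous.update(data[y])
--         d[year] = len(data[year].difference(previous))
--     return d
-- ===== SOURCE B (Python) =====
-- def __absWindow(data, k):
--     years = sorted(data)
--     if k <= 0:
--         # no previous years to compare against: every element is new
--         return {y: len(data[y]) for y in years[k:]}
--     if k >= len(years):
--         # no year has k predecessors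
--         return {}
--     cnt = {}
--     for y in years[:k]:
--         for e in data[y]:
--             cnt[e] = cnt.get(e, 0) + 1
--     out = {}
--     for i in range(k, len(years)):
--         year = years[i]
--         out[year] = sum(1 for e in data[year] if not cnt.get(e, 0))
--         for e in data[years[i - k]]:
--             cnt[e] -= 1
--         for e in data[year]:
--             cnt[e] = cnt.get(e, 0) + 1
--     return out
-- ===== Notes on version B (the rewrite author's own statement) =====
-- stated objective: faster
-- what changed: Replaces A's per-year rescans (years.index plus rebuilding the union of the previous k years' sets from scratch for every year) with a single sliding-window pass that maintains an element->multiplicity counter, so 'new' is just counter[e]==0.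
import Mathlib
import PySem

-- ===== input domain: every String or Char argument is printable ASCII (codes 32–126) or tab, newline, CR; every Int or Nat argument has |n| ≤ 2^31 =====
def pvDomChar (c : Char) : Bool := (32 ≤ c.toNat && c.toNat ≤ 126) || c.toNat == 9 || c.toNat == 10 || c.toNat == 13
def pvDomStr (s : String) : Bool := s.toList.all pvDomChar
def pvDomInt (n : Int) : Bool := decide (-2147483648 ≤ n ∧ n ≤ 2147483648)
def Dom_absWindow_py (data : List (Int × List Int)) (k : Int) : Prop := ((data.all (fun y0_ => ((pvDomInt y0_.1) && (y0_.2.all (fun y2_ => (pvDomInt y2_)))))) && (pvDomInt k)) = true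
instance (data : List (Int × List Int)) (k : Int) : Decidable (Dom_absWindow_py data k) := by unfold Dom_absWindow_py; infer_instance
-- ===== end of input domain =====

-- B replaces A's per-year re-scan (years.index + rebuilding the k-year union from scratch)
-- by a sliding element->multiplicity counter, updated as the window moves (faster).
-- ===== PORT A =====
def absWindow_py (data : List (Int × List Int)) (k : Int) : List (Int × Int) :=
  let dd : PySem.Dict Int (List Int) := PySem.Dict.mk data
  let years := PySem.List.sorted dd.keys (fun x => x) false
  -- 'years.index(year)' never raises here (year ∈ years), so .getD 0 is exact
  let res := (PySem.List.slice years (some k) none).foldl (fun d year =>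
      let i : Int := ((PySem.List.index? years year).getD 0 : Nat)
      let previous : PySem.Set Int :=
        (PySem.List.slice years (some (i - k)) (some i)).foldl
          (fun s y => PySem.Set.update s (dd.getD y [])) PySem.Set.empty
      d.insert year ((PySem.Set.len (PySem.Set.diff (PySem.Set.ofList (dd.getD year [])) previous) : Int)))
    PySem.Dict.empty
  res.items

-- ===== PORT B =====
def absWindow_py_alt (data : List (Int × List Int)) (k : Int) : List (Int × Int) :=
  let dd : PySem.Dict Int (List Int) := PySem.Dict.mk data
  let years := PySem.List.sorted dd.keys (fun x => x) false
  if k ≤ 0 then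
    (PySem.List.slice years (some k) none).map
      (fun y => (y, (PySem.Set.len (PySem.Set.ofList (dd.getD y [])) : Int)))
  else if (years.length : Int) ≤ k then
    (PySem.Dict.empty : PySem.Dict Int Int).items
  else
    let cnt0 : PySem.Dict Int Int :=
      (PySem.List.slice years none (some k)).foldl
        (fun c y => (dd.getD y []).foldl (fun c e => c.insert e (c.getD e 0 + 1)) c)
        PySem.Dict.empty
    let res := (PySem.List.pyRange k (years.length : Int) 1).foldl
      (fun (st : PySem.Dict Int Int × PySem.Dict Int Int) i =>
        let cnt := st.1
        let year := PySem.List.pyGetD years i 0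
        -- sum over the set data[year] of the 0/1 indicator: a countP over its distinct elements
        let out := st.2.insert year
          (((PySem.Set.ofList (dd.getD year [])).countP (fun e => cnt.getD e 0 == 0) : Nat) : Int)
        -- 'cnt[e] -= 1' never raises (e was added when years[i-k] entered), so modify with default 0 is exact
        let cnt := (dd.getD (PySem.List.pyGetD years (i - k) 0) []).foldl
          (fun c e => c.modify e 0 (· - 1)) cnt
        let cnt := (dd.getD year []).foldl (fun c e => c.insert e (c.getD e 0 + 1)) cnt
        (cnt, out))
      (cnt0, PySem.Dict.empty)
    res.2.items

-- ===== PRECONDITION & SPEC =====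
-- Pre_ excludes association lists with duplicate keys: a Python dict can never hold them
-- (the Lean assoc-list value does not correspond to any Python input A receives).
def Pre_absWindow_py (data : List (Int × List Int)) (k : Int) : Prop :=
  (data.map Prod.fst).Nodup
instance (data : List (Int × List Int)) (k : Int) : Decidable (Pre_absWindow_py data k) := by
  unfold Pre_absWindow_py; infer_instance
def pvWitness_absWindow_py : (List (Int × List Int)) × Int := ([(1, [1, 2]), (2, [2, 3]), (3, [4])], 1)

def Spec_absWindow_py (data : List (Int × List Int)) (k : Int) (out : List (Int × Int)) : Prop := out = absWindow_py_alt data k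
instance (data : List (Int × List Int)) (k : Int) (out : List (Int × Int)) : Decidable (Spec_absWindow_py data k out) := by unfold Spec_absWindow_py; infer_instance

-- ===== CLAIM (what is proved, stated in full; the proofs are below) =====
def Claim_equal_absWindow_py : Prop := ∀ (data : List (Int × List Int)) (k : Int), Dom_absWindow_py data k → Pre_absWindow_py data k → Spec_absWindow_py data k (absWindow_py data k)

-- ===== LEMMAS AND PROOFS =====
def pvG (data : List (Int × List Int)) (y : Int) : List Int := (PySem.Dict.mk data).getD y []
def pvYears (data : List (Int × List Int)) : List Int :=
  PySem.List.sorted (PySem.Dict.mk data).keys (fun x => x) false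
def pvWin (data : List (Int × List Int)) (k' t : Nat) : List Int :=
  ((pvYears data).drop t).take k'
def pvCnt (data : List (Int × List Int)) (k' t : Nat) (e : Int) : Int :=
  ((pvWin data k' t).map (fun y => ((pvG data y).count e : Int))).sum

theorem pv_getD_foldl_modify_sub (L : List Int) (c : PySem.Dict Int Int) (e : Int) :
    (L.foldl (fun c e => c.modify e 0 (· - 1)) c).getD e 0 = c.getD e 0 - L.count e := by
  induction L generalizing c with
  | nil => simp
  | cons x L ih =>
    simp only [List.foldl_cons, ih, PySem.Dict.getD_modify, List.count_cons]
    by_cases hx : e = x <;> simp [hx, beq_iff_eq] <;> omega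

theorem pv_nodup_years (data : List (Int × List Int)) (h : (data.map Prod.fst).Nodup) :
    (pvYears data).Nodup := by
  have hp := PySem.List.sorted_perm (PySem.Dict.mk data).keys (fun x => x) false
  exact hp.nodup_iff.mpr (by simpa [PySem.Dict.keys_mk] using h)

theorem pv_mem_union (data : List (Int × List Int)) (ws : List Int) (s : PySem.Set Int) (e : Int) :
    e ∈ ws.foldl (fun s y => PySem.Set.update s (pvG data y)) s ↔
      e ∈ s ∨ ∃ y ∈ ws, e ∈ pvG data y := by
  induction ws generalizing s with
  | nil => simp
  | cons x ws ih =>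
    simp [List.foldl_cons, ih, PySem.Set.mem_update]
    tauto

theorem pv_getD_cnt_years (data : List (Int × List Int)) (ws : List Int)
    (c : PySem.Dict Int Int) (e : Int) :
    (ws.foldl (fun c y => ((PySem.Dict.mk data).getD y []).foldl
        (fun c e => c.insert e (c.getD e 0 + 1)) c) c).getD e 0
      = c.getD e 0 + ((ws.map (fun y => ((pvG data y).count e : Int))).sum) := by
  induction ws generalizing c with
  | nil => simp
  | cons x ws ih =>
    simp only [List.foldl_cons, ih, PySem.Dict.getD_foldl_insert_add_one, List.map_cons,
      List.sum_cons]
    unfold pvG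
    ring

theorem pv_cnt_eq_zero (data : List (Int × List Int)) (k' t : Nat) (e : Int) :
    pvCnt data k' t e = 0 ↔ ∀ y ∈ pvWin data k' t, e ∉ pvG data y := by
  unfold pvCnt
  rw [show ((pvWin data k' t).map (fun y => ((pvG data y).count e : Int))).sum
      = (((pvWin data k' t).map (fun y => (pvG data y).count e)).sum : Nat) by
    rw [Nat.cast_list_sum, List.map_map]; rfl]
  rw [Nat.cast_eq_zero, List.sum_eq_zero_iff]
  simp [List.count_eq_zero]

theorem pv_win_slide (data : List (Int × List Int)) (k' t : Nat) (hk : 1 ≤ k')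
    (h : k' + t + 1 ≤ (pvYears data).length) (e : Int) :
    pvCnt data k' (t + 1) e =
      pvCnt data k' t e - ((pvG data ((pvYears data).getD t 0)).count e : Int)
        + ((pvG data ((pvYears data).getD (k' + t) 0)).count e : Int) := by
  set ys := pvYears data with hys
  have ht : t < ys.length := by omega
  have h1 : ys.drop t = ys[t] :: ys.drop (t + 1) := (List.getElem_cons_drop ht).symm
  have hwt : pvWin data k' t = ys[t] :: (ys.drop (t + 1)).take (k' - 1) := by
    unfold pvWin
    rw [← hys, h1, show k' = (k' - 1) + 1 by omega, List.take_succ_cons, Nat.add_sub_cancel]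
  have hidx : k' + t < ys.length := by omega
  have h2 : (ys.drop (t + 1)).take k' = (ys.drop (t + 1)).take (k' - 1) ++ [ys[k' + t]] := by
    conv_lhs => rw [show k' = (k' - 1) + 1 by omega, List.take_add_one]
    congr 1
    rw [List.getElem?_drop]
    rw [show t + 1 + (k' - 1) = k' + t by omega, List.getElem?_eq_getElem hidx]
    rfl
  have hwt1 : pvWin data k' (t + 1) = (ys.drop (t + 1)).take (k' - 1) ++ [ys[k' + t]] := by
    unfold pvWin; rw [← hys, h2]
  unfold pvCnt
  rw [hwt, hwt1, List.map_cons, List.sum_cons, List.map_append, List.sum_append]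
  have g1 : ys.getD t 0 = ys[t] := List.getD_eq_getElem ys 0 ht
  have g2 : ys.getD (k' + t) 0 = ys[k' + t] := List.getD_eq_getElem ys 0 hidx
  rw [g1, g2]
  simp

def pvAval (data : List (Int × List Int)) (k : Int) (year : Int) : Int :=
  let years := pvYears data
  let i : Int := ((PySem.List.index? years year).getD 0 : Nat)
  let previous : PySem.Set Int :=
    (PySem.List.slice years (some (i - k)) (some i)).foldl
      (fun s y => PySem.Set.update s (pvG data y)) PySem.Set.empty
  (PySem.Set.len (PySem.Set.diff (PySem.Set.ofList (pvG data year)) previous) : Int)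

theorem pv_slice_nat_le (xs : List Int) (a b : Nat) (h : b ≤ a) :
    PySem.List.slice xs (some (a : Int)) (some (b : Int)) = [] := by
  have hl := PySem.List.length_slice xs (a : Int) (b : Int)
  rw [PySem.List.clampIdx_natCast, PySem.List.clampIdx_natCast] at hl
  exact List.length_eq_zero_iff.mp (by omega)

theorem pv_diff_empty (s : PySem.Set Int) : PySem.Set.diff s PySem.Set.empty = s := by
  show s.filter (fun x => !PySem.Set.contains ([] : PySem.Set Int) x) = s
  simp [PySem.Set.contains]

theorem pv_Aval_nonpos (data : List (Int × List Int)) (k : Int) (hk : k ≤ 0) (y : Int) :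
    pvAval data k y = ((PySem.Set.ofList (pvG data y)).length : Int) := by
  dsimp only [pvAval]
  set i0 : Nat := (PySem.List.index? (pvYears data) y).getD 0 with hi0
  have h1 : ((i0 : Int) - k) = ((i0 + (-k).toNat : Nat) : Int) := by push_cast; omega
  rw [h1, pv_slice_nat_le _ _ _ (by omega)]
  simp only [List.foldl_nil, pv_diff_empty]
  rfl

theorem pv_A_shape (data : List (Int × List Int)) (k : Int) (h : (data.map Prod.fst).Nodup) :
    absWindow_py data k =
      ((pvYears data).drop (PySem.List.clampIdx (pvYears data).length k)).map
        (fun y => (y, pvAval data k y)) := by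
  rw [show absWindow_py data k
      = ((PySem.List.slice (pvYears data) (some k) none).foldl
          (fun d year => d.insert year (pvAval data k year)) PySem.Dict.empty).items from rfl]
  rw [PySem.List.slice_some_none]
  have hnd : (List.drop (PySem.List.clampIdx (pvYears data).length k) (pvYears data)).Nodup :=
    (pv_nodup_years data h).sublist (List.drop_sublist _ _)
  have := PySem.Dict.items_foldl_insert_fresh
    (List.drop (PySem.List.clampIdx (pvYears data).length k) (pvYears data))
    (fun a => a) (pvAval data k) PySem.Dict.empty
    (by intro a _; simp) (by simpa using hnd)
  simpa using this

def pvBval (data : List (Int × List Int)) (k' j : Nat) : Int :=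
  (((PySem.Set.ofList (pvG data ((pvYears data).getD (k' + j) 0))).countP
      (fun e => pvCnt data k' j e == 0) : Nat) : Int)

theorem pv_index_getElem (xs : List Int) (hnd : xs.Nodup) (i : Nat) (hi : i < xs.length) :
    PySem.List.index? xs xs[i] = some i := by
  rw [PySem.List.index?_eq_some_iff]
  refine ⟨xs.take i, xs.drop (i + 1), ?_, ?_, ?_⟩
  · conv_lhs => rw [← List.take_append_drop i xs]
    rw [← List.getElem_cons_drop hi]
  · simp [List.length_take, Nat.min_eq_left (le_of_lt hi)]
  · intro hmem
    obtain ⟨j, hj, hje⟩ := List.mem_iff_getElem.mp hmem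
    have hjlt : j < i := by simp only [List.length_take, Nat.lt_min] at hj; exact hj.1
    rw [List.getElem_take] at hje
    exact absurd ((List.Nodup.getElem_inj_iff hnd).mp hje) (by omega)

theorem pv_Aval_eq_Bval (data : List (Int × List Int)) (k' j : Nat)
    (h : (data.map Prod.fst).Nodup) (hk : 1 ≤ k') (hlt : k' + j < (pvYears data).length) :
    pvAval data (k' : Int) ((pvYears data).getD (k' + j) 0) = pvBval data k' j := by
  set ys := pvYears data with hys
  have hg : ys.getD (k' + j) 0 = ys[k' + j] := List.getD_eq_getElem ys 0 hlt
  dsimp only [pvAval]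
  rw [← hys, hg, pv_index_getElem ys (pv_nodup_years data h) (k' + j) hlt]
  have hsub : (((k' + j : Nat) : Int)) - (k' : Int) = ((j : Nat) : Int) := by push_cast; omega
  simp only [Option.getD_some, hsub]
  rw [PySem.List.slice_toNat ys (by positivity) (by positivity)]
  rw [Int.toNat_natCast, Int.toNat_natCast, show k' + j - j = k' by omega]
  have hwin : List.take k' (List.drop j ys) = pvWin data k' j := by unfold pvWin; rw [← hys]
  rw [hwin]
  unfold pvBval
  rw [← hys, hg]
  show ((PySem.Set.ofList (pvG data ys[k' + j])).filter
      (fun x => !PySem.Set.contains (List.foldl (fun s y => PySem.Set.update s (pvG data y))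
        PySem.Set.empty (pvWin data k' j)) x)).length
    = (((PySem.Set.ofList (pvG data ys[k' + j])).countP (fun e => pvCnt data k' j e == 0) : Nat) : Int)
  rw [← List.countP_eq_length_filter]
  congr 1
  apply List.countP_congr
  intro e _
  have hmem : PySem.Set.contains (List.foldl (fun s y => PySem.Set.update s (pvG data y))
      PySem.Set.empty (pvWin data k' j)) e = true ↔ ∃ y ∈ pvWin data k' j, e ∈ pvG data y := by
    rw [PySem.Set.contains_iff, pv_mem_union]
    simp [PySem.Set.empty]
  rw [Bool.eq_iff_iff, Bool.not_eq_true', ← Bool.not_eq_true, hmem, beq_iff_eq, pv_cnt_eq_zero]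
  push Not
  simp

theorem pv_pyRange_nil (a b : Int) (h : b ≤ a) : PySem.List.pyRange a b 1 = [] := by
  rw [List.eq_nil_iff_forall_not_mem]
  intro x hx
  rw [PySem.List.mem_pyRange_one] at hx
  omega

theorem pv_B_loop (data : List (Int × List Int)) (k' : Nat) (hk : 1 ≤ k')
    (h : (data.map Prod.fst).Nodup) (t : Nat) (ht : k' + t ≤ (pvYears data).length) :
    (∀ e, ((PySem.List.pyRange (k' : Int) ((k' + t : Nat) : Int) 1).foldl
        (fun (st : PySem.Dict Int Int × PySem.Dict Int Int) i =>
          let cnt := st.1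
          let year := PySem.List.pyGetD (pvYears data) i 0
          let out := st.2.insert year
            (((PySem.Set.ofList ((PySem.Dict.mk data).getD year [])).countP
                (fun e => cnt.getD e 0 == 0) : Nat) : Int)
          let cnt := ((PySem.Dict.mk data).getD (PySem.List.pyGetD (pvYears data) (i - (k' : Int)) 0) []).foldl
            (fun c e => c.modify e 0 (· - 1)) cnt
          let cnt := ((PySem.Dict.mk data).getD year []).foldl
            (fun c e => c.insert e (c.getD e 0 + 1)) cnt
          (cnt, out))
        (((PySem.List.slice (pvYears data) none (some (k' : Int))).foldl
            (fun c y => ((PySem.Dict.mk data).getD y []).foldl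
              (fun c e => c.insert e (c.getD e 0 + 1)) c) PySem.Dict.empty),
         PySem.Dict.empty)).1.getD e 0 = pvCnt data k' t e) ∧
    ((PySem.List.pyRange (k' : Int) ((k' + t : Nat) : Int) 1).foldl
        (fun (st : PySem.Dict Int Int × PySem.Dict Int Int) i =>
          let cnt := st.1
          let year := PySem.List.pyGetD (pvYears data) i 0
          let out := st.2.insert year
            (((PySem.Set.ofList ((PySem.Dict.mk data).getD year [])).countP
                (fun e => cnt.getD e 0 == 0) : Nat) : Int)
          let cnt := ((PySem.Dict.mk data).getD (PySem.List.pyGetD (pvYears data) (i - (k' : Int)) 0) []).foldl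
            (fun c e => c.modify e 0 (· - 1)) cnt
          let cnt := ((PySem.Dict.mk data).getD year []).foldl
            (fun c e => c.insert e (c.getD e 0 + 1)) cnt
          (cnt, out))
        (((PySem.List.slice (pvYears data) none (some (k' : Int))).foldl
            (fun c y => ((PySem.Dict.mk data).getD y []).foldl
              (fun c e => c.insert e (c.getD e 0 + 1)) c) PySem.Dict.empty),
         PySem.Dict.empty)).2.items
      = (List.range t).map (fun j => ((pvYears data).getD (k' + j) 0, pvBval data k' j)) := by
  induction t with
  | zero =>
    rw [Nat.add_zero, pv_pyRange_nil _ _ le_rfl]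
    simp only [List.foldl_nil]
    constructor
    · intro e
      rw [PySem.List.slice_to _ (by positivity), Int.toNat_natCast]
      rw [pv_getD_cnt_years data (List.take k' (pvYears data)) PySem.Dict.empty e]
      simp [pvCnt, pvWin]
    · rfl
  | succ t ih =>
    have ih' := ih (by omega)
    have hcast : ((k' + (t + 1) : Nat) : Int) = ((k' + t : Nat) : Int) + 1 := by push_cast; ring
    rw [hcast, PySem.List.pyRange_one_succ_right (by push_cast; omega), List.foldl_append,
      List.foldl_cons, List.foldl_nil]
    set st := ((PySem.List.pyRange (k' : Int) ((k' + t : Nat) : Int) 1).foldl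
        (fun (st : PySem.Dict Int Int × PySem.Dict Int Int) i =>
          let cnt := st.1
          let year := PySem.List.pyGetD (pvYears data) i 0
          let out := st.2.insert year
            (((PySem.Set.ofList ((PySem.Dict.mk data).getD year [])).countP
                (fun e => cnt.getD e 0 == 0) : Nat) : Int)
          let cnt := ((PySem.Dict.mk data).getD (PySem.List.pyGetD (pvYears data) (i - (k' : Int)) 0) []).foldl
            (fun c e => c.modify e 0 (· - 1)) cnt
          let cnt := ((PySem.Dict.mk data).getD year []).foldl
            (fun c e => c.insert e (c.getD e 0 + 1)) cnt
          (cnt, out))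
        (((PySem.List.slice (pvYears data) none (some (k' : Int))).foldl
            (fun c y => ((PySem.Dict.mk data).getD y []).foldl
              (fun c e => c.insert e (c.getD e 0 + 1)) c) PySem.Dict.empty),
         PySem.Dict.empty)) with hst
    dsimp only
    have hyear : PySem.List.pyGetD (pvYears data) ((k' + t : Nat) : Int) 0
        = (pvYears data).getD (k' + t) 0 := PySem.List.pyGetD_natCast _ _ _
    have hleave : PySem.List.pyGetD (pvYears data) (((k' + t : Nat) : Int) - (k' : Int)) 0
        = (pvYears data).getD t 0 := by
      rw [show (((k' + t : Nat) : Int) - (k' : Int)) = ((t : Nat) : Int) by push_cast; ring]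
      exact PySem.List.pyGetD_natCast _ _ _
    constructor
    · intro e
      rw [hyear, hleave, PySem.Dict.getD_foldl_insert_add_one, pv_getD_foldl_modify_sub, ih'.1 e]
      rw [pv_win_slide data k' t hk (by omega) e]
      rfl
    · rw [hyear]
      have hval : (((PySem.Set.ofList ((PySem.Dict.mk data).getD ((pvYears data).getD (k' + t) 0) [])).countP
          (fun e => st.1.getD e 0 == 0) : Nat) : Int) = pvBval data k' t := by
        unfold pvBval
        congr 1
        apply List.countP_congr
        intro e _
        rw [ih'.1 e]
      have hfresh : st.2.contains ((pvYears data).getD (k' + t) 0) = false := by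
        rw [PySem.Dict.contains_eq_decide_mem_keys, decide_eq_false_iff_not]
        have hkeys : st.2.keys = (List.range t).map (fun j => (pvYears data).getD (k' + j) 0) := by
          show st.2.items.map Prod.fst = _
          rw [ih'.2, List.map_map]
          rfl
        rw [hkeys]
        intro hmem
        obtain ⟨j, hj, hje⟩ := List.mem_iff_getElem.mp hmem
        rw [List.getElem_map, List.getElem_range] at hje
        have hjlt : j < t := by simpa using hj
        have hb1 : k' + j < (pvYears data).length := by omega
        have hb2 : k' + t < (pvYears data).length := by omega
        rw [List.getD_eq_getElem _ 0 hb1, List.getD_eq_getElem _ 0 hb2] at hje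
        have := (List.Nodup.getElem_inj_iff (pv_nodup_years data h)).mp hje
        omega
      rw [hval, PySem.Dict.items_insert_of_not_contains _ _ hfresh, ih'.2,
        List.range_succ, List.map_append]
      rfl

theorem pv_B_shape_pos (data : List (Int × List Int)) (k : Int) (hk : 0 < k)
    (h : (data.map Prod.fst).Nodup) :
    absWindow_py_alt data k =
      (List.range ((pvYears data).length - k.toNat)).map
        (fun j => ((pvYears data).getD (k.toNat + j) 0, pvBval data k.toNat j)) := by
  dsimp only [absWindow_py_alt]
  rw [if_neg (by omega)]
  have hlen : (PySem.List.sorted (PySem.Dict.mk data).keys (fun x => x) false).length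
      = (pvYears data).length := rfl
  by_cases hn : ((pvYears data).length : Int) ≤ k
  · rw [if_pos (by rw [hlen]; omega)]
    rw [show (pvYears data).length - k.toNat = 0 by omega]
    rfl
  · rw [if_neg (by rw [hlen]; omega)]
    rw [show k = ((k.toNat : Nat) : Int) from (Int.toNat_of_nonneg hk.le).symm]
    simp only [Int.toNat_natCast]
    have hb := pv_B_loop data k.toNat (by omega) h ((pvYears data).length - k.toNat) (by omega)
    rw [show k.toNat + ((pvYears data).length - k.toNat) = (pvYears data).length by omega] at hb
    exact hb.2

theorem pv_main : ∀ (data : List (Int × List Int)) (k : Int),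
    (data.map Prod.fst).Nodup → absWindow_py data k = absWindow_py_alt data k := by
  intro data k hpre
  by_cases hk : k ≤ 0
  · rw [pv_A_shape data k hpre]
    dsimp only [absWindow_py_alt]
    rw [if_pos hk, PySem.List.slice_some_none]
    apply List.map_congr_left
    intro y _
    rw [pv_Aval_nonpos data k hk y]
    rfl
  · rw [pv_A_shape data k hpre, pv_B_shape_pos data k (by omega) hpre]
    rw [show k = ((k.toNat : Nat) : Int) from (Int.toNat_of_nonneg (by omega)).symm,
      PySem.List.clampIdx_natCast]
    set ys := pvYears data with hys
    set k' := k.toNat with hk'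
    have hdrop : ys.drop (min k' ys.length) = ys.drop k' := by
      rcases le_total k' ys.length with hle | hle
      · rw [Nat.min_eq_left hle]
      · rw [Nat.min_eq_right hle, List.drop_length, List.drop_eq_nil_of_le hle]
    rw [hdrop]
    apply List.ext_getElem
    · simp
    · intro j hj1 hj2
      simp only [List.getElem_map, List.getElem_drop, List.getElem_range]
      have hb : k' + j < ys.length := by
        simp only [List.length_map, List.length_drop] at hj1
        omega
      have hgd : ys.getD (k' + j) 0 = ys[k' + j] := List.getD_eq_getElem ys 0 hb
      have := pv_Aval_eq_Bval data k' j hpre (by omega) (by rw [← hys]; omega)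
      rw [← hys, hgd] at this
      rw [this]
      simp only [Int.toNat_natCast, hgd]

-- ===== VERDICT (by name: the statement is the Claim_ definition above) =====
theorem absWindow_py_spec : Claim_equal_absWindow_py := by
  intro data k _hdom hpre
  unfold Spec_absWindow_py
  exact pv_main data k hpre
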